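-- pv_equiv track=rewrite | github.com/mihneabondor/AP1 | domain.py | getStudNotaMax
-- ===== SOURCE A (Python) =====
-- def getNota(student):
--     return student["nota"]
--
-- def getStudNotaMax(allStudents):
--     students = []
--     nota = 0
--     for stud in allStudents:
--         if nota < getNota(stud):
--             nota = getNota(stud)
--             students = [stud]
--         elif nota == getNota(stud):
--             students.append(stud)
--     return students
-- ===== SOURCE B (Python) =====
-- def getNota(student):
--     return student["nota"]
--
-- def getStudNotaMax(allStudents):
--     maxNota = 0
--     for stud in allStudents:
--         if getNota(stud) > maxNota:
--             maxNota = getNota(stud)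
--     return [stud for stud in allStudents if getNota(stud) == maxNota]
-- ===== Notes on version B (the rewrite author's own statement) =====
-- stated objective: simpler
-- what changed: Replaces A's single loop maintaining a rebuilt/appended candidate list with a two-pass decomposition: first fold the grades into a maximum seeded at 0, then filter the students whose grade equals it.
import Mathlib
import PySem

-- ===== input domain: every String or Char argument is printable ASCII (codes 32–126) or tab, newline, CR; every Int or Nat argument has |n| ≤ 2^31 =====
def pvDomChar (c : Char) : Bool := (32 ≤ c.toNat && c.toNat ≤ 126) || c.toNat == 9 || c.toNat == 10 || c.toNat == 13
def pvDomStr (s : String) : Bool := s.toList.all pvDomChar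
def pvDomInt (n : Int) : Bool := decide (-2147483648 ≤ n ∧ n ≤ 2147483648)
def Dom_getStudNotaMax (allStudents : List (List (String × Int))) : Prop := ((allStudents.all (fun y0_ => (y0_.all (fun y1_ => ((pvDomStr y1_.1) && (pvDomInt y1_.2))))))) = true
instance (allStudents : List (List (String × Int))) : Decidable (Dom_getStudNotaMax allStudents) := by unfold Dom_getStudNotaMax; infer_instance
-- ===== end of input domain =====

-- B replaces A's single loop that rebuilds/appends a candidate list with a two-pass
-- decomposition: fold the grades to a maximum seeded at 0, then filter for equality.


-- ===== PORT A =====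
-- student["nota"]: Python raises KeyError when the key is missing; Pre_ excludes that,
-- so the default 0 of getD is never observed on admitted inputs.
def getNotaA (student : List (String × Int)) : Int := PySem.Dict.getD (PySem.Dict.mk student) "nota" 0

def getStudNotaMax (allStudents : List (List (String × Int))) : List (List (String × Int)) :=
  (allStudents.foldl
    (fun (st : List (List (String × Int)) × Int) stud =>
      if st.2 < getNotaA stud then ([stud], getNotaA stud)
      else if st.2 = getNotaA stud then (st.1 ++ [stud], st.2)
      else st)
    ([], 0)).1

-- ===== PORT B =====
def getNotaB (student : List (String × Int)) : Int := PySem.Dict.getD (PySem.Dict.mk student) "nota" 0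

def getStudNotaMax_alt (allStudents : List (List (String × Int))) : List (List (String × Int)) :=
  let maxNota := allStudents.foldl (fun m stud => if getNotaB stud > m then getNotaB stud else m) 0
  allStudents.filter (fun stud => getNotaB stud == maxNota)

-- ===== PRECONDITION & SPEC =====
-- Pre_ excludes exactly the inputs on which Python A raises KeyError: a student dict without key "nota".
def Pre_getStudNotaMax (allStudents : List (List (String × Int))) : Prop :=
  ∀ stud ∈ allStudents, (PySem.Dict.get? (PySem.Dict.mk stud) "nota").isSome = true
instance (allStudents : List (List (String × Int))) : Decidable (Pre_getStudNotaMax allStudents) := by unfold Pre_getStudNotaMax; infer_instance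

def pvWitness_getStudNotaMax : (List (List (String × Int))) := [[("nota", 7)], [("nota", 7), ("x", 1)]]

def Spec_getStudNotaMax (allStudents : List (List (String × Int))) (out : List (List (String × Int))) : Prop := out = getStudNotaMax_alt allStudents
instance (allStudents : List (List (String × Int))) (out : List (List (String × Int))) : Decidable (Spec_getStudNotaMax allStudents out) := by unfold Spec_getStudNotaMax; infer_instance

-- ===== CLAIM (what is proved, stated in full; the proofs are below) =====
def Claim_equal_getStudNotaMax : Prop := ∀ (allStudents : List (List (String × Int))), Dom_getStudNotaMax allStudents → Pre_getStudNotaMax allStudents → Spec_getStudNotaMax allStudents (getStudNotaMax allStudents)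

-- ===== LEMMAS AND PROOFS =====

lemma getNotaB_eq : getNotaB = getNotaA := rfl

-- B's max fold never goes below its seed.
lemma maxfold_ge (l : List (List (String × Int))) (m : Int) :
    m ≤ l.foldl (fun a stud => if getNotaA stud > a then getNotaA stud else a) m := by
  induction l generalizing m with
  | nil => simp
  | cons s t ih =>
    simp only [List.foldl_cons]
    split
    · exact le_trans (le_of_lt (by assumption)) (ih _)
    · exact ih _

-- Loop invariant: from state (acc, m), A's fold returns the filter of the suffix at the
-- final max, preceded by acc exactly when the max is not improved.
lemma loopA (l : List (List (String × Int))) (acc : List (List (String × Int))) (m : Int) :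
    l.foldl
      (fun (st : List (List (String × Int)) × Int) stud =>
        if st.2 < getNotaA stud then ([stud], getNotaA stud)
        else if st.2 = getNotaA stud then (st.1 ++ [stud], st.2)
        else st)
      (acc, m)
    = ((if l.foldl (fun a stud => if getNotaA stud > a then getNotaA stud else a) m = m
          then acc else [])
        ++ l.filter (fun stud =>
            getNotaA stud == l.foldl (fun a stud => if getNotaA stud > a then getNotaA stud else a) m),
       l.foldl (fun a stud => if getNotaA stud > a then getNotaA stud else a) m) := by
  induction l generalizing acc m with
  | nil => simp
  | cons s t ih =>
    simp only [List.foldl_cons, List.filter_cons, gt_iff_lt]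
    by_cases h1 : m < getNotaA s
    · have hge := maxfold_ge t (getNotaA s)
      simp only [gt_iff_lt] at hge
      have hne : ¬ (t.foldl (fun a stud => if a < getNotaA stud then getNotaA stud else a) (getNotaA s) = m) := by omega
      simp only [h1, if_true, ih, hne, if_false, List.nil_append]
      by_cases h2 : getNotaA s = t.foldl (fun a stud => if a < getNotaA stud then getNotaA stud else a) (getNotaA s)
      · simp [← h2]
      · simp [h2, Ne.symm h2]
    · have hmm : ¬ (getNotaA s > m) := h1
      by_cases h2 : m = getNotaA s
      · simp only [h2, if_true, ih]
        have hge := maxfold_ge t m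
        simp only [gt_iff_lt] at hge
        by_cases h3 : t.foldl (fun a stud => if a < getNotaA stud then getNotaA stud else a) m = m
        · simp [h3, ← h2]
        · simp only [← h2]
          have h3' : ¬ (m = List.foldl (fun a stud => if a < getNotaA stud then getNotaA stud else a) m t) :=
            fun h => h3 h.symm
          simp [h3, h3']
      · simp only [h1, if_false, h2, ih]
        have hge := maxfold_ge t m
        simp only [gt_iff_lt] at hge
        have : ¬ (getNotaA s = t.foldl (fun a stud => if a < getNotaA stud then getNotaA stud else a) m) := by omega
        simp [this]

-- ===== VERDICT (by name: the statement is the Claim_ definition above) =====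
theorem getStudNotaMax_spec : Claim_equal_getStudNotaMax := by
  intro allStudents _ _
  unfold Spec_getStudNotaMax getStudNotaMax getStudNotaMax_alt
  simp only [getNotaB_eq]
  rw [loopA]
  split <;> simp
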